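-- pv_equiv track=rewrite | github.com/danhilse/web-scraper | contxt/formatters/youtube_formatter.py | _format_video_raw
-- ===== SOURCE A (Python) =====
-- def _format_video_raw(video, url):
--     """Format an individual video from a playlist/channel in raw format."""
--     output = []
--
--     # Title and minimal metadata
--     output.append(f"Title: {video.get('title', 'Unknown Video')}")
--     output.append(f"Channel: {video.get('channel', 'Unknown')}")
--     output.append(f"URL: {url}")
--     output.append("")
--
--     # Prioritize transcript_no_times if available
--     if "transcript_no_times" in video and video["transcript_no_times"]:
--         transcript = video["transcript_no_times"]
--     else:
--         # Otherwise, use transcript with timestamps and strip them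
--         transcript = video.get('transcript', '')
--         if transcript:
--             transcript_lines = []
--             for line in transcript.split("\n"):
--                 if line.startswith("[") and "]" in line:
--                     # Strip timestamp
--                     transcript_lines.append(line.split("] ", 1)[1] if "] " in line else line)
--                 else:
--                     transcript_lines.append(line)
--             transcript = "\n".join(transcript_lines)
--
--     if transcript:
--         output.append("Transcript:")
--         output.append(transcript)
--     else:
--         output.append("No transcript available for this video.")
--
--     return "\n".join(output)
-- ===== SOURCE B (Python) =====
-- def _strip_timestamps(t):
--     """Single pass over the raw transcript: at each line start, if the line
--     begins with '[' and contains '] ' before the next newline, jump past it."""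
--     out = []
--     i = 0
--     line_start = True
--     while i < len(t):
--         c = t[i]
--         if line_start and c == "[":
--             j = t.find("] ", i)
--             k = t.find("\n", i)
--             if j != -1 and (k == -1 or j < k):
--                 i = j + 2
--                 line_start = False
--                 continue
--         out.append(c)
--         line_start = c == "\n"
--         i += 1
--     return "".join(out)
--
--
-- def _format_video_raw(video, url):
--     """Format an individual video from a playlist/channel in raw format."""
--     header = (
--         f"Title: {video.get('title', 'Unknown Video')}\n"
--         f"Channel: {video.get('channel', 'Unknown')}\n"
--         f"URL: {url}\n"
--     )
--     t = video.get("transcript_no_times") or _strip_timestamps(video.get("transcript", ""))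
--     return header + (f"\nTranscript:\n{t}" if t else "\nNo transcript available for this video.")
-- ===== Notes on version B (the rewrite author's own statement) =====
-- stated objective: alternative
-- what changed: Timestamp stripping no longer splits the transcript into a list of lines, transforms each line and rejoins them; B makes a single left-to-right scan over the raw string that, at each line start, jumps past a leading '[...] ' (found via str.find bounded by the next newline), so no intermediate line list is built.
import Mathlib
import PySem

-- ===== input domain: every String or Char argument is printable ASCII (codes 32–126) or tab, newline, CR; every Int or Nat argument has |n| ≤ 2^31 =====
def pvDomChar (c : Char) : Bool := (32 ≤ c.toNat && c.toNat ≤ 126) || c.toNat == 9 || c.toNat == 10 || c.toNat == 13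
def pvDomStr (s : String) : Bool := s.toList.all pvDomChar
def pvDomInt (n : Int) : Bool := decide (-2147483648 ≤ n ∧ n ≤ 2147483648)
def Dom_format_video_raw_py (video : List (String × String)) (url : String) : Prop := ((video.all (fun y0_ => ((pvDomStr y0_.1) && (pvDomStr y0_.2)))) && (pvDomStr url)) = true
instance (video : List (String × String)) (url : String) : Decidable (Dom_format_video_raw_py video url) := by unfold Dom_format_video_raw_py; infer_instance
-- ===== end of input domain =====

-- B replaces A's split-lines/per-line-conditional/rejoin timestamp stripping by a single
-- left-to-right scan of the transcript that jumps past a leading "[…] " at each line start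
-- (objective: alternative — one pass, no intermediate list of lines).

-- ===== PORT A =====

-- per-line body of A's for-loop over transcript.split("\n")
def pvStripLineA (line : String) : String :=
  if PySem.Str.startswith line "[" && PySem.Str.isIn "]" line then
    if PySem.Str.isIn "] " line then
      -- line.split("] ", 1)[1]; with "] " in line the split has exactly two pieces,
      -- so the [1] never raises; the fallback branch is unreachable
      match PySem.Str.splitMax? line "] " 1 with
      | some (_ :: second :: _) => second
      | _ => line
    else line
  else line

def format_video_raw_py (video : List (String × String)) (url : String) : String :=
  let d := PySem.Dict.ofList video
  let output : List String := []
  let output := output ++ ["Title: " ++ d.getD "title" "Unknown Video"]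
  let output := output ++ ["Channel: " ++ d.getD "channel" "Unknown"]
  let output := output ++ ["URL: " ++ url]
  let output := output ++ [""]
  let transcript :=
    if d.contains "transcript_no_times" && decide (d.getD "transcript_no_times" "" ≠ "") then
      d.getD "transcript_no_times" ""
    else
      let t := d.getD "transcript" ""
      if t ≠ "" then
        PySem.Str.join "\n" ((((PySem.Str.split? t "\n").getD []).map pvStripLineA))
      else t
  let output :=
    if transcript ≠ "" then output ++ ["Transcript:", transcript]
    else output ++ ["No transcript available for this video."]
  PySem.Str.join "\n" output

-- ===== PORT B =====

-- termination helper for the scan: a successful find at start i lies at an index ≥ i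
theorem pvFindFrom_ge (t sub : List Char) (i : Nat) (hi : i ≤ t.length)
    (h : PySem.Chars.findFrom t sub (i : Int) none ≠ -1) :
    (i : Int) ≤ PySem.Chars.findFrom t sub (i : Int) none := by
  rw [PySem.Chars.findFrom_natCast t sub i hi] at *
  split at h
  · simp at h
  · rename_i hf
    split
    · omega
    · have := PySem.Chars.neg_one_le_find (t.drop i) sub
      omega

-- the while-loop of Source B's _strip_timestamps
def pvStripScan (t : List Char) (i : Nat) (lineStart : Bool) (acc : List Char) : List Char :=
  if h : i < t.length then
    let c := t[i]
    let j := PySem.Chars.findFrom t [']', ' '] (i : Int) none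
    let k := PySem.Chars.findFrom t ['\n'] (i : Int) none
    if hc : lineStart = true ∧ c = '[' ∧ j ≠ -1 ∧ (k = -1 ∨ j < k) then
      pvStripScan t (j.toNat + 2) false acc
    else
      pvStripScan t (i + 1) (c == '\n') (acc ++ [c])
  else acc
termination_by t.length - i
decreasing_by
  · have hj : (i : Int) ≤ PySem.Chars.findFrom t [']', ' '] (i : Int) none :=
      pvFindFrom_ge t [']', ' '] i (by omega) hc.2.2.1
    omega
  · omega

def pvStrip (t : String) : String := String.ofList (pvStripScan t.toList 0 true [])

def format_video_raw_py_alt (video : List (String × String)) (url : String) : String :=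
  let d := PySem.Dict.ofList video
  let header :=
    "Title: " ++ d.getD "title" "Unknown Video" ++ "\n" ++
    "Channel: " ++ d.getD "channel" "Unknown" ++ "\n" ++
    "URL: " ++ url ++ "\n"
  -- video.get("transcript_no_times") or _strip_timestamps(video.get("transcript", ""))
  let t :=
    match d.get? "transcript_no_times" with
    | some v => if v ≠ "" then v else pvStrip (d.getD "transcript" "")
    | none => pvStrip (d.getD "transcript" "")
  if t ≠ "" then header ++ "\nTranscript:\n" ++ t
  else header ++ "\nNo transcript available for this video."

-- ===== PRECONDITION & SPEC =====
def Spec_format_video_raw_py (video : List (String × String)) (url : String) (out : String) : Prop := out = format_video_raw_py_alt video url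
instance (video : List (String × String)) (url : String) (out : String) : Decidable (Spec_format_video_raw_py video url out) := by unfold Spec_format_video_raw_py; infer_instance

-- ===== CLAIM (what is proved, stated in full; the proofs are below) =====
def Claim_equal_format_video_raw_py : Prop := ∀ (video : List (String × String)) (url : String), Dom_format_video_raw_py video url → Spec_format_video_raw_py video url (format_video_raw_py video url)

-- ===== LEMMAS AND PROOFS =====

theorem pvFind_go_shift (sub s : List Char) : ∀ (k : Nat),
    PySem.Chars.find.go sub s k =
      if PySem.Chars.find.go sub s 0 = -1 then -1 else PySem.Chars.find.go sub s 0 + k := by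
  induction s with
  | nil =>
    intro k
    simp only [PySem.Chars.find.go]
    split <;> simp
  | cons c r ih =>
    intro k
    simp only [PySem.Chars.find.go]
    split
    · simp
    · rw [ih (k + 1), ih 1]
      have hnn := PySem.Chars.neg_one_le_find r sub
      simp only [PySem.Chars.find] at hnn
      by_cases h0 : PySem.Chars.find.go sub r 0 = -1
      · simp [h0]
      · rw [if_neg h0, if_neg h0, if_neg (by omega)]
        push_cast
        omega

theorem pvFind_nil (sub : List Char) (h : sub ≠ []) : PySem.Chars.find [] sub = -1 := by
  simp [PySem.Chars.find, PySem.Chars.find.go, h]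

theorem pvFind_cons (sub : List Char) (c : Char) (r : List Char) :
    PySem.Chars.find (c :: r) sub =
      if sub.isPrefixOf (c :: r) then 0
      else if PySem.Chars.find r sub = -1 then -1 else PySem.Chars.find r sub + 1 := by
  simp only [PySem.Chars.find, PySem.Chars.find.go]
  split
  · rfl
  · exact pvFind_go_shift sub r 1

def pvFindStamp : List Char → Option Nat
  | [] => none
  | l@(c :: r) =>
    if [']', ' '].isPrefixOf l then some 2
    else if c = '\n' then none
    else (pvFindStamp r).map (· + 1)

theorem pvFindStamp_bounds : ∀ (s : List Char) (m : Nat),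
    pvFindStamp s = some m → 2 ≤ m ∧ m ≤ s.length := by
  intro s
  induction s with
  | nil => intro m h; simp [pvFindStamp] at h
  | cons c r ih =>
    intro m h
    simp only [pvFindStamp] at h
    split at h
    · rename_i hp
      cases h
      have : ([']', ' '] : List Char).length ≤ (c :: r).length :=
        List.IsPrefix.length_le (List.isPrefixOf_iff_prefix.mp hp)
      simp at this ⊢
      omega
    · split at h
      · simp at h
      · simp only [Option.map_eq_some_iff] at h
        obtain ⟨m', hm', rfl⟩ := h
        have := ih m' hm'
        simp
        omega

theorem pvFindStamp_eq_find (s : List Char) :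
    pvFindStamp s =
      if PySem.Chars.find s [']', ' '] ≠ -1 ∧
         (PySem.Chars.find s ['\n'] = -1 ∨ PySem.Chars.find s [']', ' '] < PySem.Chars.find s ['\n'])
      then some ((PySem.Chars.find s [']', ' ']).toNat + 2) else none := by
  induction s with
  | nil =>
    rw [pvFind_nil [']', ' '] (by simp), pvFind_nil ['\n'] (by simp)]
    simp [pvFindStamp]
  | cons c r ih =>
    have h1 := PySem.Chars.neg_one_le_find r [']', ' ']
    have h2 := PySem.Chars.neg_one_le_find r ['\n']
    rw [pvFind_cons [']', ' '] c r, pvFind_cons ['\n'] c r]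
    by_cases hp : [']', ' '].isPrefixOf (c :: r)
    · have hc : c = ']' := by
        obtain ⟨t, ht⟩ := List.isPrefixOf_iff_prefix.mp hp
        cases ht
        rfl
      have hnp : ¬ ['\n'].isPrefixOf (c :: r) := by
        simp [List.isPrefixOf, hc]
      simp only [pvFindStamp, if_pos hp, if_neg hnp]
      rw [if_pos]
      · simp
      · refine ⟨by simp, ?_⟩
        by_cases hb : PySem.Chars.find r ['\n'] = -1
        · rw [if_pos hb]; left; rfl
        · rw [if_neg hb]; right; omega
    · by_cases hnl : c = '\n'
      · have hnp : ['\n'].isPrefixOf (c :: r) := by simp [List.isPrefixOf, hnl]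
        simp only [pvFindStamp, if_neg hp, if_pos hnp, if_pos hnl]
        rw [if_neg]
        rintro ⟨ha, hb | hb⟩
        · exact absurd hb (by norm_num)
        · revert hb
          split <;> omega
      · have hnp : ¬ ['\n'].isPrefixOf (c :: r) := by
          simp [List.isPrefixOf]
          exact fun h => absurd h.symm hnl
        simp only [pvFindStamp, if_neg hp, if_neg hnp, if_neg hnl, ih]
        by_cases ha : PySem.Chars.find r [']', ' '] = -1
        · rw [if_neg (by push_neg; intro h; omega), if_pos ha, if_neg (by simp)]
          simp
        · by_cases hb : PySem.Chars.find r ['\n'] = -1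
          · rw [if_pos ⟨ha, Or.inl hb⟩, if_neg ha, if_pos hb]
            rw [if_pos ⟨by omega, Or.inl rfl⟩]
            simp only [Option.map_some, Option.some.injEq]
            omega
          · rw [if_neg ha, if_neg hb]
            by_cases hab : PySem.Chars.find r [']', ' '] < PySem.Chars.find r ['\n']
            · rw [if_pos ⟨ha, Or.inr hab⟩, if_pos ⟨by omega, Or.inr (by omega)⟩]
              simp only [Option.map_some, Option.some.injEq]
              omega
            · rw [if_neg (by push_neg; intro _; omega), if_neg (by push_neg; intro _; omega)]
              simp

-- structural form of Source B's scan: recursion over the character list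
def pvG : List Char → Bool → List Char
  | [], _ => []
  | c :: r, ls =>
    if h : ls = true ∧ c = '[' ∧ (pvFindStamp (c :: r)).isSome then
      pvG ((c :: r).drop ((pvFindStamp (c :: r)).getD 0)) false
    else
      c :: pvG r (c == '\n')
termination_by l => l.length
decreasing_by
  · obtain ⟨m, hm⟩ := Option.isSome_iff_exists.mp h.2.2
    have := pvFindStamp_bounds _ m hm
    simp [hm]
    omega
  · simp

theorem pvScan_eq_G (t : List Char) :
    ∀ (n i : Nat), t.length - i ≤ n → i ≤ t.length → ∀ (ls : Bool) (acc : List Char),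
      pvStripScan t i ls acc = acc ++ pvG (t.drop i) ls := by
  intro n
  induction n with
  | zero =>
    intro i hn hi ls acc
    have hie : i = t.length := by omega
    rw [pvStripScan, dif_neg (by omega)]
    simp [hie, pvG]
  | succ n ih =>
    intro i hn hi ls acc
    by_cases h : i < t.length
    · rw [pvStripScan, dif_pos h]
      have hdrop : t.drop i = t[i] :: t.drop (i + 1) := List.drop_eq_getElem_cons h
      have hb1 := PySem.Chars.neg_one_le_find (t.drop i) [']', ' ']
      have hb2 := PySem.Chars.neg_one_le_find (t.drop i) ['\n']
      have hf1 := PySem.Chars.findFrom_natCast t [']', ' '] i hi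
      have hf2 := PySem.Chars.findFrom_natCast t ['\n'] i hi
      have hstamp := pvFindStamp_eq_find (t.drop i)
      simp only [hf1, hf2]
      by_cases hcnd : ls = true ∧ t[i] = '[' ∧ PySem.Chars.find (t.drop i) [']', ' '] ≠ -1 ∧
          (PySem.Chars.find (t.drop i) ['\n'] = -1 ∨
            PySem.Chars.find (t.drop i) [']', ' '] < PySem.Chars.find (t.drop i) ['\n'])
      · obtain ⟨hls, hbr, hne, hor⟩ := hcnd
        subst hls
        rw [dif_pos ⟨rfl, hbr, by
          rw [if_neg hne]
          refine ⟨by omega, ?_⟩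
          by_cases h2 : PySem.Chars.find (List.drop i t) ['\n'] = -1
          · left; rw [if_pos h2]
          · right
            rw [if_neg h2]
            rcases hor with h' | h'
            · exact absurd h' h2
            · omega⟩]
        rw [if_neg hne]
        have hm : pvFindStamp (List.drop i t) =
            some ((PySem.Chars.find (List.drop i t) [']', ' ']).toNat + 2) := by
          rw [hstamp, if_pos ⟨hne, hor⟩]
        have hbnd := pvFindStamp_bounds _ _ hm
        rw [List.length_drop] at hbnd
        have hidx : ((i : Int) + PySem.Chars.find (List.drop i t) [']', ' ']).toNat + 2 =
            i + ((PySem.Chars.find (List.drop i t) [']', ' ']).toNat + 2) := by omega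
        rw [hidx, ih _ (by omega) (by omega)]
        have hGr : pvG (List.drop i t) true =
            pvG ((List.drop i t).drop ((PySem.Chars.find (List.drop i t) [']', ' ']).toNat + 2)) false := by
          rw [hdrop, pvG, ← hdrop, dif_pos ⟨rfl, hbr, by rw [hm]; rfl⟩, hm]
          rfl
        rw [hGr, List.drop_drop, Nat.add_comm]
      · have hneg : ¬ (ls = true ∧ t[i] = '[' ∧
            (if PySem.Chars.find (List.drop i t) [']', ' '] = -1 then (-1 : Int)
              else ↑i + PySem.Chars.find (List.drop i t) [']', ' ']) ≠ -1 ∧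
            ((if PySem.Chars.find (List.drop i t) ['\n'] = -1 then (-1 : Int)
                else ↑i + PySem.Chars.find (List.drop i t) ['\n']) = -1 ∨
              (if PySem.Chars.find (List.drop i t) [']', ' '] = -1 then (-1 : Int)
                else ↑i + PySem.Chars.find (List.drop i t) [']', ' ']) <
                if PySem.Chars.find (List.drop i t) ['\n'] = -1 then (-1 : Int)
                else ↑i + PySem.Chars.find (List.drop i t) ['\n'])) := by
          rintro ⟨ha, hb, hc, hd⟩
          apply hcnd
          refine ⟨ha, hb, ?_, ?_⟩
          · intro h1
            rw [if_pos h1] at hc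
            exact hc rfl
          · by_cases h1 : PySem.Chars.find (List.drop i t) [']', ' '] = -1
            · rw [if_pos h1] at hc
              exact absurd rfl hc
            · rw [if_neg h1] at hd
              by_cases h2 : PySem.Chars.find (List.drop i t) ['\n'] = -1
              · exact Or.inl h2
              · rw [if_neg h2] at hd
                rcases hd with hd | hd
                · omega
                · exact Or.inr (by omega)
        rw [dif_neg hneg]
        rw [ih (i + 1) (by omega) (by omega)]
        have hGr : pvG (List.drop i t) ls = t[i] :: pvG (List.drop (i + 1) t) (t[i] == '\n') := by
          rw [hdrop, pvG, ← hdrop, dif_neg]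
          rintro ⟨ha, hb, hsome⟩
          rw [hstamp] at hsome
          revert hsome
          split
          · rename_i hcc
            intro
            exact hcnd ⟨ha, hb, hcc⟩
          · intro hsome
            simp at hsome
        rw [hGr]
        simp
    · have hie : i = t.length := by omega
      rw [pvStripScan, dif_neg (by omega)]
      simp [hie, pvG]

-- line decomposition matching Python's s.split("\n")
def pvLines (pre : List Char) : List Char → List (List Char)
  | [] => [pre]
  | c :: r => if c = '\n' then pre :: pvLines [] r else pvLines (pre ++ [c]) r

theorem pvSplitOn_go_eq : ∀ (fuel : Nat) (s cur : List Char) (acc : List (List Char)),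
    s.length < fuel →
    PySem.Chars.splitOn.go ['\n'] fuel s cur acc = acc.reverse ++ pvLines cur.reverse s := by
  intro fuel
  induction fuel with
  | zero => intro s cur acc h; omega
  | succ fuel ih =>
    intro s cur acc h
    cases s with
    | nil => simp [PySem.Chars.splitOn.go, pvLines]
    | cons c r =>
      by_cases hc : c = '\n'
      · have hp : (['\n'] : List Char).isPrefixOf (c :: r) := by simp [List.isPrefixOf, hc]
        simp only [PySem.Chars.splitOn.go, if_pos hp]
        rw [ih _ _ _ (by simp at h ⊢; omega)]
        simp [pvLines, hc]
      · have hp : ¬ (['\n'] : List Char).isPrefixOf (c :: r) := by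
          simp [List.isPrefixOf]
          exact fun h' => absurd h'.symm hc
        simp only [PySem.Chars.splitOn.go, if_neg hp]
        rw [ih _ _ _ (by simp at h ⊢; omega)]
        simp [pvLines, hc]

theorem pvSplitOn_eq (s : List Char) : PySem.Chars.splitOn s ['\n'] = pvLines [] s := by
  rw [PySem.Chars.splitOn, pvSplitOn_go_eq (s.length + 1) s [] [] (by omega)]
  simp

-- split("] ", 1): accumulator form
def pvSplit1 (pre : List Char) : List Char → List (List Char)
  | [] => [pre]
  | l@(c :: r) => if [']', ' '].isPrefixOf l then [pre, l.drop 2] else pvSplit1 (pre ++ [c]) r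

theorem pvSplitOnMax_go_zero : ∀ (fuel : Nat) (l cur : List Char) (acc : List (List Char)),
    PySem.Chars.splitOnMax.go [']', ' '] fuel 0 l cur acc = acc.reverse ++ [cur.reverse ++ l] := by
  intro fuel l cur acc
  cases fuel with
  | zero => simp [PySem.Chars.splitOnMax.go]
  | succ fuel =>
    cases l with
    | nil => simp [PySem.Chars.splitOnMax.go]
    | cons c r => simp [PySem.Chars.splitOnMax.go]

theorem pvSplitOnMax_go_one : ∀ (fuel : Nat) (s cur : List Char) (acc : List (List Char)),
    s.length < fuel →
    PySem.Chars.splitOnMax.go [']', ' '] fuel 1 s cur acc = acc.reverse ++ pvSplit1 cur.reverse s := by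
  intro fuel
  induction fuel with
  | zero => intro s cur acc h; omega
  | succ fuel ih =>
    intro s cur acc h
    cases s with
    | nil => simp [PySem.Chars.splitOnMax.go, pvSplit1]
    | cons c r =>
      by_cases hp : ([']', ' '] : List Char).isPrefixOf (c :: r)
      · simp only [PySem.Chars.splitOnMax.go, if_neg (by omega : ¬ (1 : Nat) = 0), if_pos hp]
        rw [pvSplitOnMax_go_zero]
        simp [pvSplit1, hp]
      · simp only [PySem.Chars.splitOnMax.go, if_neg (by omega : ¬ (1 : Nat) = 0), if_neg hp]
        rw [ih _ _ _ (by simp at h ⊢; omega)]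
        simp [pvSplit1, hp]

theorem pvSplitMax?_eq (l : List Char) :
    PySem.Chars.splitMax? l [']', ' '] 1 = some (pvSplit1 [] l) := by
  rw [PySem.Chars.splitMax?, if_neg (by simp), PySem.Chars.splitOnMax,
    if_neg (by omega : ¬ (1 : Int) < 0)]
  have : ((1 : Int)).toNat = 1 := rfl
  rw [this, pvSplitOnMax_go_one (l.length + 1) l [] [] (by omega)]
  simp

theorem pvSplit1_stamp (l : List Char) (hl : '\n' ∉ l) : ∀ (pre : List Char),
    pvSplit1 pre l = match pvFindStamp l with
      | some m => [pre ++ l.take (m - 2), l.drop m]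
      | none => [pre ++ l] := by
  induction l with
  | nil => intro pre; simp [pvSplit1, pvFindStamp]
  | cons c r ih =>
    intro pre
    have hc : c ≠ '\n' := fun h => hl (h ▸ List.mem_cons_self)
    by_cases hp : ([']', ' '] : List Char).isPrefixOf (c :: r)
    · simp [pvSplit1, pvFindStamp, hp]
    · simp only [pvSplit1, if_neg hp, pvFindStamp, if_neg hc]
      rw [ih (fun h => hl (List.mem_cons_of_mem c h)) (pre ++ [c])]
      cases hs : pvFindStamp r with
      | none => simp
      | some m =>
        have hb := pvFindStamp_bounds r m hs
        simp only [Option.map_some]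
        have h1 : m + 1 - 2 = (m - 2) + 1 := by omega
        have h2 : (c :: r).take ((m - 2) + 1) = c :: r.take (m - 2) := by simp
        have h3 : (c :: r).drop (m + 1) = r.drop m := by simp
        simp [h1, h2, h3]

-- a stamp search never looks past the line's terminating newline
theorem pvFindStamp_append (l rest : List Char) (hl : '\n' ∉ l) :
    pvFindStamp (l ++ '\n' :: rest) = pvFindStamp l := by
  induction l with
  | nil => simp [pvFindStamp, List.isPrefixOf]
  | cons c r ih =>
    have hc : c ≠ '\n' := fun h => hl (h ▸ List.mem_cons_self)
    have hpre : ([']', ' '] : List Char).isPrefixOf (c :: (r ++ '\n' :: rest)) =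
        ([']', ' '] : List Char).isPrefixOf (c :: r) := by
      cases r with
      | nil => simp [List.isPrefixOf]
      | cons x r' => simp [List.isPrefixOf]
    simp only [pvFindStamp, List.cons_append, hpre]
    rw [ih (fun h => hl (List.mem_cons_of_mem c h))]

-- what A's per-line branch computes, at the character level
def pvLineF (l : List Char) : List Char :=
  if (['['] : List Char).isPrefixOf l ∧ (pvFindStamp l).isSome
  then l.drop ((pvFindStamp l).getD 0) else l

theorem pvG_false_nonl (l : List Char) (hl : '\n' ∉ l) : pvG l false = l := by
  induction l with
  | nil => simp [pvG]
  | cons c r ih =>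
    have hc : c ≠ '\n' := fun h => hl (h ▸ List.mem_cons_self)
    rw [pvG, dif_neg (by rintro ⟨h, -⟩; exact Bool.false_ne_true h)]
    rw [beq_eq_false_iff_ne.mpr hc] at *
    rw [ih (fun h => hl (List.mem_cons_of_mem c h))]

theorem pvG_false_line (l rest : List Char) (hl : '\n' ∉ l) :
    pvG (l ++ '\n' :: rest) false = l ++ '\n' :: pvG rest true := by
  induction l with
  | nil =>
    rw [List.nil_append, pvG, dif_neg (by rintro ⟨h, -⟩; exact Bool.false_ne_true h)]
    simp
  | cons c r ih =>
    have hc : c ≠ '\n' := fun h => hl (h ▸ List.mem_cons_self)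
    rw [List.cons_append, pvG, dif_neg (by rintro ⟨h, -⟩; exact Bool.false_ne_true h)]
    rw [beq_eq_false_iff_ne.mpr hc]
    rw [ih (fun h => hl (List.mem_cons_of_mem c h))]
    simp

theorem pvG_true_line (l rest : List Char) (hl : '\n' ∉ l) :
    pvG (l ++ '\n' :: rest) true = pvLineF l ++ '\n' :: pvG rest true := by
  cases l with
  | nil =>
    rw [List.nil_append, pvG, dif_neg (by rintro ⟨-, h, -⟩; exact absurd h (by decide))]
    simp [pvLineF, List.isPrefixOf]
  | cons c r =>
    have hc : c ≠ '\n' := fun h => hl (h ▸ List.mem_cons_self)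
    have hstamp : pvFindStamp (c :: r ++ '\n' :: rest) = pvFindStamp (c :: r) :=
      pvFindStamp_append (c :: r) rest hl
    have hpre : (['['] : List Char).isPrefixOf (c :: r) = (c = '[') := by
      simp [List.isPrefixOf]
      constructor
      · exact fun h => h.symm
      · exact fun h => h.symm
    by_cases hcnd : c = '[' ∧ (pvFindStamp (c :: r)).isSome
    · obtain ⟨hbr, hsome⟩ := hcnd
      obtain ⟨m, hm⟩ := Option.isSome_iff_exists.mp hsome
      have hb := pvFindStamp_bounds _ _ hm
      rw [List.cons_append, pvG, dif_pos ⟨rfl, hbr, by rw [← List.cons_append, hstamp]; exact hsome⟩]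
      rw [← List.cons_append, hstamp, hm]
      simp only [Option.getD_some]
      have hdr : ((c :: r) ++ '\n' :: rest).drop m = (c :: r).drop m ++ '\n' :: rest :=
        List.drop_append_of_le_length (by simpa using hb.2)
      rw [hdr, pvG_false_line _ _ (fun h => hl (List.drop_subset _ _ h))]
      rw [pvLineF, if_pos ⟨by rw [hpre]; exact hbr, hsome⟩, hm]
      rfl
    · rw [List.cons_append, pvG, dif_neg (by
        rintro ⟨-, hbr, hsome⟩
        rw [← List.cons_append, hstamp] at hsome
        exact hcnd ⟨hbr, hsome⟩)]
      rw [beq_eq_false_iff_ne.mpr hc]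
      rw [pvG_false_line r rest (fun h => hl (List.mem_cons_of_mem c h))]
      rw [pvLineF, if_neg (by rw [hpre]; exact hcnd)]
      rfl

theorem pvG_true_last (l : List Char) (hl : '\n' ∉ l) : pvG l true = pvLineF l := by
  cases l with
  | nil => simp [pvG, pvLineF, List.isPrefixOf]
  | cons c r =>
    have hc : c ≠ '\n' := fun h => hl (h ▸ List.mem_cons_self)
    have hpre : (['['] : List Char).isPrefixOf (c :: r) = (c = '[') := by
      simp [List.isPrefixOf]
      constructor
      · exact fun h => h.symm
      · exact fun h => h.symm
    by_cases hcnd : c = '[' ∧ (pvFindStamp (c :: r)).isSome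
    · obtain ⟨hbr, hsome⟩ := hcnd
      obtain ⟨m, hm⟩ := Option.isSome_iff_exists.mp hsome
      rw [pvG, dif_pos ⟨rfl, hbr, hsome⟩, hm]
      simp only [Option.getD_some]
      rw [pvG_false_nonl _ (fun h => hl (List.drop_subset _ _ h))]
      rw [pvLineF, if_pos ⟨by rw [hpre]; exact hbr, hsome⟩, hm]
      rfl
    · rw [pvG, dif_neg (by rintro ⟨-, hbr, hsome⟩; exact hcnd ⟨hbr, hsome⟩)]
      rw [beq_eq_false_iff_ne.mpr hc]
      rw [pvG_false_nonl r (fun h => hl (List.mem_cons_of_mem c h))]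
      rw [pvLineF, if_neg (by rw [hpre]; exact hcnd)]

theorem pvLines_nonl (l : List Char) (hl : '\n' ∉ l) : ∀ (pre : List Char),
    pvLines pre l = [pre ++ l] := by
  induction l with
  | nil => intro pre; simp [pvLines]
  | cons c r ih =>
    intro pre
    have hc : c ≠ '\n' := fun h => hl (h ▸ List.mem_cons_self)
    simp only [pvLines, if_neg hc]
    rw [ih (fun h => hl (List.mem_cons_of_mem c h))]
    simp

theorem pvLines_append (l : List Char) (hl : '\n' ∉ l) : ∀ (pre rest : List Char),
    pvLines pre (l ++ '\n' :: rest) = (pre ++ l) :: pvLines [] rest := by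
  induction l with
  | nil => intro pre rest; simp [pvLines]
  | cons c r ih =>
    intro pre rest
    have hc : c ≠ '\n' := fun h => hl (h ▸ List.mem_cons_self)
    simp only [List.cons_append, pvLines, if_neg hc]
    rw [ih (fun h => hl (List.mem_cons_of_mem c h))]
    simp

theorem pvLines_ne_nil : ∀ (l pre : List Char), pvLines pre l ≠ [] := by
  intro l
  induction l with
  | nil => intro pre; simp [pvLines]
  | cons c r ih =>
    intro pre
    by_cases hc : c = '\n'
    · simp [pvLines, hc]
    · simp only [pvLines, if_neg hc]
      exact ih (pre ++ [c])

theorem pvLines_mem_nonl : ∀ (cs pre l : List Char), '\n' ∉ pre → l ∈ pvLines pre cs → '\n' ∉ l := by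
  intro cs
  induction cs with
  | nil =>
    intro pre l hpre hmem
    simp [pvLines] at hmem
    exact hmem ▸ hpre
  | cons c r ih =>
    intro pre l hpre hmem
    by_cases hc : c = '\n'
    · simp only [pvLines, if_pos hc] at hmem
      rcases List.mem_cons.mp hmem with h | h
      · exact h ▸ hpre
      · exact ih [] l (by simp) h
    · simp only [pvLines, if_neg hc] at hmem
      exact ih (pre ++ [c]) l (by
        intro h
        rcases List.mem_append.mp h with h' | h'
        · exact hpre h'
        · simp at h'
          exact hc h'.symm) hmem

theorem pvLine_decomp : ∀ (cs : List Char),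
    '\n' ∉ cs ∨ ∃ l r, cs = l ++ '\n' :: r ∧ '\n' ∉ l := by
  intro cs
  induction cs with
  | nil => left; simp
  | cons c t ih =>
    by_cases hc : c = '\n'
    · right
      exact ⟨[], t, by simp [hc], by simp⟩
    · rcases ih with h | ⟨l, r, hr, hl⟩
      · left
        intro hm
        rcases List.mem_cons.mp hm with h' | h'
        · exact hc h'.symm
        · exact h h'
      · right
        refine ⟨c :: l, r, by simp [hr], ?_⟩
        intro hm
        rcases List.mem_cons.mp hm with h' | h'
        · exact hc h'.symm
        · exact hl h'

theorem pvJoin_lines : ∀ (n : Nat) (cs : List Char), cs.length ≤ n →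
    PySem.Chars.join ['\n'] ((pvLines [] cs).map pvLineF) = pvG cs true := by
  intro n
  induction n with
  | zero =>
    intro cs h
    have hcs : cs = [] := List.eq_nil_of_length_eq_zero (by omega)
    subst hcs
    rw [pvLines_nonl [] (by simp) [], pvG_true_last [] (by simp)]
    simp only [List.nil_append, List.map_cons, List.map_nil]
    exact PySem.Chars.join_singleton _ _
  | succ n ih =>
    intro cs h
    rcases pvLine_decomp cs with hnl | ⟨l, r, hr, hl⟩
    · rw [pvLines_nonl cs hnl [], pvG_true_last cs hnl]
      simp only [List.nil_append, List.map_cons, List.map_nil]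
      exact PySem.Chars.join_singleton _ _
    · subst hr
      have hlen : r.length ≤ n := by
        have := List.length_append (as := l) (bs := '\n' :: r)
        simp at this h
        omega
      rw [pvLines_append l hl [] r, pvG_true_line l r hl, ← ih r hlen]
      cases hq : pvLines [] r with
      | nil => exact absurd hq (pvLines_ne_nil r [])
      | cons q qs =>
        simp only [List.nil_append, List.map_cons, PySem.Chars.join_cons_cons]
        simp

theorem pvStripLineA_toList (l : List Char) (hl : '\n' ∉ l) :
    (pvStripLineA (String.ofList l)).toList = pvLineF l := by
  have hfnl : PySem.Chars.find l ['\n'] = -1 :=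
    (PySem.Chars.find_eq_neg_one_iff l ['\n']).mpr (by rw [List.singleton_infix_iff]; exact hl)
  have hstamp := pvFindStamp_eq_find l
  rw [hfnl] at hstamp
  simp only [eq_self_iff_true, true_or, and_true, ne_eq] at hstamp
  have h1 : ("[" : String).toList = ['['] := rfl
  have h3 : ("] " : String).toList = [']', ' '] := rfl
  have hsw : PySem.Str.startswith (String.ofList l) "[" = (['['] : List Char).isPrefixOf l := by
    simp [PySem.Str.startswith, PySem.Chars.startswith, h1]
  have hin2 : PySem.Str.isIn "] " (String.ofList l) = (PySem.Chars.find l [']', ' '] != -1) := by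
    simp [PySem.Str.isIn, PySem.Chars.isIn, h3]
  by_cases hp : (['['] : List Char).isPrefixOf l
  · by_cases hf : PySem.Chars.find l [']', ' '] = -1
    · have hnone : pvFindStamp l = none := by
        rw [hstamp, if_neg (by simp [hf])]
      rw [pvLineF, if_neg (by rintro ⟨-, hs⟩; rw [hnone] at hs; exact absurd hs (by simp))]
      unfold pvStripLineA
      by_cases hb : (PySem.Str.startswith (String.ofList l) "[" && PySem.Str.isIn "]" (String.ofList l)) = true
      · rw [if_pos hb, if_neg (by rw [hin2]; simp [hf])]
        exact String.toList_ofList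
      · rw [if_neg hb]
        exact String.toList_ofList
    · have hsome : pvFindStamp l = some ((PySem.Chars.find l [']', ' ']).toNat + 2) := by
        rw [hstamp, if_pos (by simp [hf])]
      have hinf : ([']', ' '] : List Char) <:+: l :=
        (PySem.Chars.find_ne_neg_one_iff l [']', ' ']).mp hf
      have hmem : ']' ∈ l := by
        obtain ⟨s, t, rfl⟩ := hinf
        simp
      have hin1 : PySem.Str.isIn "]" (String.ofList l) = true := by
        have : ([']'] : List Char) <:+: l := (List.singleton_infix_iff ']' l).mpr hmem
        simp only [PySem.Str.isIn, PySem.Chars.isIn, String.toList_ofList]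
        rw [show ("]" : String).toList = [']'] from rfl]
        simp [(PySem.Chars.find_ne_neg_one_iff l [']']).mpr this]
      rw [pvLineF, if_pos ⟨hp, by rw [hsome]; rfl⟩, hsome]
      unfold pvStripLineA
      rw [if_pos (by rw [hsw, hin1, hp]; rfl), if_pos (by rw [hin2]; simp [hf])]
      have hsp : PySem.Str.splitMax? (String.ofList l) "] " 1 =
          some ((pvSplit1 [] l).map String.ofList) := by
        rw [PySem.Str.splitMax?, String.toList_ofList, h3, pvSplitMax?_eq]
        rfl
      rw [pvSplit1_stamp l hl [], hsome] at hsp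
      simp only [List.nil_append, List.map_cons, List.map_nil] at hsp
      rw [hsp]
      simp
  · rw [pvLineF, if_neg (by rintro ⟨hp', -⟩; exact hp hp')]
    unfold pvStripLineA
    rw [if_neg (by rw [hsw]; simp [hp])]
    exact String.toList_ofList

theorem pvStrip_empty : pvStrip "" = "" := by
  have h0 : ("" : String).toList = [] := by simp
  rw [pvStrip, h0, pvStripScan, dif_neg (by simp)]

theorem stripA_eq_pvStrip (t : String) :
    PySem.Str.join "\n" (((PySem.Str.split? t "\n").getD []).map pvStripLineA) = pvStrip t := by
  have hsep : ("\n" : String).toList = ['\n'] := rfl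
  rw [← String.toList_inj]
  rw [PySem.Str.split?, hsep, PySem.Chars.split?, if_neg (by simp)]
  simp only [Option.map_some, Option.getD_some]
  rw [pvSplitOn_eq]
  simp only [PySem.Str.join, String.toList_ofList, hsep, List.map_map]
  have hmap : (pvLines [] t.toList).map (String.toList ∘ pvStripLineA ∘ String.ofList) =
      (pvLines [] t.toList).map pvLineF := by
    apply List.map_congr_left
    intro l hlmem
    exact pvStripLineA_toList l (pvLines_mem_nonl t.toList [] l (by simp) hlmem)
  rw [hmap, pvJoin_lines t.toList.length t.toList le_rfl]
  rw [pvStrip, String.toList_ofList]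
  rw [pvScan_eq_G t.toList t.toList.length 0 (by omega) (by omega) true []]
  simp

theorem pvTranscript_eq (t : String) :
    (if t ≠ "" then PySem.Str.join "\n" (((PySem.Str.split? t "\n").getD []).map pvStripLineA) else t)
      = pvStrip t := by
  by_cases h : t = ""
  · subst h
    rw [if_neg (by simp), pvStrip_empty]
  · rw [if_pos h, stripA_eq_pvStrip]

-- ===== VERDICT (by name: the statement is the Claim_ definition above) =====
theorem format_video_raw_py_spec : Claim_equal_format_video_raw_py := by
  intro video url _
  unfold Spec_format_video_raw_py
  unfold format_video_raw_py format_video_raw_py_alt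
  simp only [List.nil_append, List.cons_append, List.singleton_append]
  set d := PySem.Dict.ofList video with hd
  have htr : (if d.contains "transcript_no_times" && decide (d.getD "transcript_no_times" "" ≠ "") then
        d.getD "transcript_no_times" ""
      else if d.getD "transcript" "" ≠ "" then
        PySem.Str.join "\n" (((PySem.Str.split? (d.getD "transcript" "") "\n").getD []).map pvStripLineA)
      else d.getD "transcript" "") =
      (match d.get? "transcript_no_times" with
        | some v => if v ≠ "" then v else pvStrip (d.getD "transcript" "")
        | none => pvStrip (d.getD "transcript" "")) := by
    cases hg : d.get? "transcript_no_times" with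
    | some v =>
      have hc : d.contains "transcript_no_times" = true := by
        rw [PySem.Dict.contains_eq_isSome_get?, hg]
        rfl
      have hgd : d.getD "transcript_no_times" "" = v := PySem.Dict.getD_of_get?_eq_some d "" hg
      dsimp only
      by_cases hv : v = ""
      · subst hv
        rw [if_neg (show ¬ (("" : String) ≠ "") by simp)]
        rw [if_neg (show ¬ (d.contains "transcript_no_times" &&
            decide (d.getD "transcript_no_times" "" ≠ "")) = true by rw [hgd]; simp)]
        exact pvTranscript_eq _
      · rw [if_pos (show (d.contains "transcript_no_times" &&
            decide (d.getD "transcript_no_times" "" ≠ "")) = true by rw [hgd]; simp [hc, hv])]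
        rw [hgd, if_pos hv]
    | none =>
      have hc : d.contains "transcript_no_times" = false := by
        rw [PySem.Dict.contains_eq_isSome_get?, hg]
        rfl
      dsimp only
      rw [if_neg (show ¬ (d.contains "transcript_no_times" &&
          decide (d.getD "transcript_no_times" "" ≠ "")) = true by simp [hc])]
      exact pvTranscript_eq _
  rw [htr]
  set T := (match d.get? "transcript_no_times" with
    | some v => if v ≠ "" then v else pvStrip (d.getD "transcript" "")
    | none => pvStrip (d.getD "transcript" "")) with hT
  clear_value T
  have e0 : ("" : String).toList = [] := by simp
  have esep : ("\n" : String).toList = ['\n'] := rfl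
  have e1 : ("\nTranscript:\n" : String).toList =
      '\n' :: ("Transcript:" : String).toList ++ ['\n'] := rfl
  have e2 : ("No transcript available for this video." : String).toList =
      ("No transcript available for this video." : String).toList := rfl
  by_cases hTe : T = ""
  · subst hTe
    rw [if_neg (by simp), if_neg (by simp)]
    rw [← String.toList_inj]
    simp [PySem.Str.join, esep, PySem.Chars.join_cons_cons, PySem.Chars.join_singleton,
      String.toList_append, e0]
  · rw [if_pos hTe, if_pos hTe]
    rw [← String.toList_inj]
    simp [PySem.Str.join, esep, PySem.Chars.join_cons_cons, PySem.Chars.join_singleton,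
      String.toList_append, e0, e1]
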